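-- pv_equiv track=rewrite | github.com/rajat0808/intelligence-system | app/services/dashboard_service.py | _compute_status_counts
-- ===== SOURCE A (Python) =====
-- def _compute_status_counts(store_ids, aging_summary):
--     counts = {"HEALTHY": 0, "TRANSFER": 0, "RR_TT": 0, "VERY_DANGER": 0}
--     for store_id in store_ids:
--         aging = aging_summary.get(store_id)
--         if not aging:
--             continue
--         if aging.get("HEALTHY", 0) > 0:
--             counts["HEALTHY"] += 1
--         if aging.get("TRANSFER", 0) > 0:
--             counts["TRANSFER"] += 1
--         if aging.get("RR_TT", 0) > 0:
--             counts["RR_TT"] += 1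
--         if aging.get("VERY_DANGER", 0) > 0:
--             counts["VERY_DANGER"] += 1
--     return counts
-- ===== SOURCE B (Python) =====
-- def _compute_status_counts(store_ids, aging_summary):
--     statuses = ["HEALTHY", "TRANSFER", "RR_TT", "VERY_DANGER"]
--     return {
--         status: sum(
--             1
--             for store_id in store_ids
--             if (aging := aging_summary.get(store_id)) and aging.get(status, 0) > 0
--         )
--         for status in statuses
--     }
-- ===== Notes on version B (the rewrite author's own statement) =====
-- stated objective: alternative
-- what changed: Inverted the loop nesting: instead of one pass over store_ids updating four dict counters in place, B makes one 0/1-sum pass over store_ids per status and builds the result dict by comprehension over the fixed status list.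
import Mathlib
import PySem

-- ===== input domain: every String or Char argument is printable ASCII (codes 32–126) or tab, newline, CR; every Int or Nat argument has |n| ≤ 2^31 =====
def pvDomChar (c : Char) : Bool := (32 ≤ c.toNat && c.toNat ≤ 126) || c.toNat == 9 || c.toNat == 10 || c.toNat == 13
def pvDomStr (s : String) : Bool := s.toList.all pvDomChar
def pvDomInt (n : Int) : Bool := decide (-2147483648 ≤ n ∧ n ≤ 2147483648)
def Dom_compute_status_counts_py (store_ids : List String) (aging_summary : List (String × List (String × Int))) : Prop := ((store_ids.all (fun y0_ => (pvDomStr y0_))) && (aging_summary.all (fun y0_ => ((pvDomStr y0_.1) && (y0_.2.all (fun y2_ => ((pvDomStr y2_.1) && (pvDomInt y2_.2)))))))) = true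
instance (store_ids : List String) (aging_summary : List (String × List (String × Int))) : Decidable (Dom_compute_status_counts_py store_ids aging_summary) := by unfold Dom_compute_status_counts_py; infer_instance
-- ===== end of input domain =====

-- B inverts A's loop nesting: one 0/1-sum pass over store_ids per status (built by
-- comprehension over the fixed status list) instead of one pass updating four counters.

-- ===== PORT A =====
-- A's loop body: one store_id updates the counts dict in place.
def pvStepA (aging_summary : List (String × List (String × Int)))
    (counts : PySem.Dict String Int) (store_id : String) : PySem.Dict String Int :=
  match (PySem.Dict.mk aging_summary).get? store_id with
  | none => counts                 -- aging is None: falsy, continue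
  | some aging =>
    if aging = [] then counts      -- aging is the empty dict: falsy, continue
    else
      let c1 := if (PySem.Dict.mk aging).getD "HEALTHY" 0 > 0 then counts.modify "HEALTHY" 0 (· + 1) else counts
      let c2 := if (PySem.Dict.mk aging).getD "TRANSFER" 0 > 0 then c1.modify "TRANSFER" 0 (· + 1) else c1
      let c3 := if (PySem.Dict.mk aging).getD "RR_TT" 0 > 0 then c2.modify "RR_TT" 0 (· + 1) else c2
      if (PySem.Dict.mk aging).getD "VERY_DANGER" 0 > 0 then c3.modify "VERY_DANGER" 0 (· + 1) else c3

def compute_status_counts_py (store_ids : List String) (aging_summary : List (String × List (String × Int))) : List (String × Int) :=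
  (store_ids.foldl (pvStepA aging_summary)
    (PySem.Dict.mk [("HEALTHY", 0), ("TRANSFER", 0), ("RR_TT", 0), ("VERY_DANGER", 0)])).items

-- ===== PORT B =====
-- B's per-status pass: sum(1 for store_id in store_ids if (aging := aging_summary.get(store_id)) and aging.get(status, 0) > 0)
def pvCountB (store_ids : List String) (aging_summary : List (String × List (String × Int))) (status : String) : Int :=
  (store_ids.map (fun store_id =>
    match (PySem.Dict.mk aging_summary).get? store_id with
    | none => (0 : Int)
    | some aging => if aging ≠ [] ∧ (PySem.Dict.mk aging).getD status 0 > 0 then 1 else 0)).sum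

def compute_status_counts_py_alt (store_ids : List String) (aging_summary : List (String × List (String × Int))) : List (String × Int) :=
  ["HEALTHY", "TRANSFER", "RR_TT", "VERY_DANGER"].map
    (fun status => (status, pvCountB store_ids aging_summary status))

-- ===== PRECONDITION & SPEC =====
def Spec_compute_status_counts_py (store_ids : List String) (aging_summary : List (String × List (String × Int))) (out : List (String × Int)) : Prop := out = compute_status_counts_py_alt store_ids aging_summary
instance (store_ids : List String) (aging_summary : List (String × List (String × Int))) (out : List (String × Int)) : Decidable (Spec_compute_status_counts_py store_ids aging_summary out) := by unfold Spec_compute_status_counts_py; infer_instance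

-- ===== CLAIM (what is proved, stated in full; the proofs are below) =====
def Claim_equal_compute_status_counts_py : Prop := ∀ (store_ids : List String) (aging_summary : List (String × List (String × Int))), Dom_compute_status_counts_py store_ids aging_summary → Spec_compute_status_counts_py store_ids aging_summary (compute_status_counts_py store_ids aging_summary)

-- ===== LEMMAS AND PROOFS =====

-- modify on A's literal counts dict, one lemma per key
theorem pvMod_HEALTHY (a b c d : Int) :
    (PySem.Dict.mk [("HEALTHY", a), ("TRANSFER", b), ("RR_TT", c), ("VERY_DANGER", d)]).modify "HEALTHY" 0 (· + 1) = PySem.Dict.mk [("HEALTHY", a + 1), ("TRANSFER", b), ("RR_TT", c), ("VERY_DANGER", d)] := by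
  simp [PySem.Dict.modify, PySem.Dict.insert, PySem.Dict.getD, PySem.Dict.get?, PySem.Dict.contains]

-- modify on A's literal counts dict, one lemma per key
theorem pvMod_TRANSFER (a b c d : Int) :
    (PySem.Dict.mk [("HEALTHY", a), ("TRANSFER", b), ("RR_TT", c), ("VERY_DANGER", d)]).modify "TRANSFER" 0 (· + 1) = PySem.Dict.mk [("HEALTHY", a), ("TRANSFER", b + 1), ("RR_TT", c), ("VERY_DANGER", d)] := by
  simp [PySem.Dict.modify, PySem.Dict.insert, PySem.Dict.getD, PySem.Dict.get?, PySem.Dict.contains]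

-- modify on A's literal counts dict, one lemma per key
theorem pvMod_RR_TT (a b c d : Int) :
    (PySem.Dict.mk [("HEALTHY", a), ("TRANSFER", b), ("RR_TT", c), ("VERY_DANGER", d)]).modify "RR_TT" 0 (· + 1) = PySem.Dict.mk [("HEALTHY", a), ("TRANSFER", b), ("RR_TT", c + 1), ("VERY_DANGER", d)] := by
  simp [PySem.Dict.modify, PySem.Dict.insert, PySem.Dict.getD, PySem.Dict.get?, PySem.Dict.contains]

-- modify on A's literal counts dict, one lemma per key
theorem pvMod_VERY_DANGER (a b c d : Int) :
    (PySem.Dict.mk [("HEALTHY", a), ("TRANSFER", b), ("RR_TT", c), ("VERY_DANGER", d)]).modify "VERY_DANGER" 0 (· + 1) = PySem.Dict.mk [("HEALTHY", a), ("TRANSFER", b), ("RR_TT", c), ("VERY_DANGER", d + 1)] := by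
  simp [PySem.Dict.modify, PySem.Dict.insert, PySem.Dict.getD, PySem.Dict.get?, PySem.Dict.contains]

-- Loop invariant of A's single pass: starting from arbitrary counter values h t r v,
-- the fold adds exactly B's per-status counts.
theorem pv_loop_inv (aging_summary : List (String × List (String × Int)))
    (sids : List String) (h t r v : Int) :
    sids.foldl (pvStepA aging_summary)
      (PySem.Dict.mk [("HEALTHY", h), ("TRANSFER", t), ("RR_TT", r), ("VERY_DANGER", v)]) =
    PySem.Dict.mk
      [("HEALTHY", h + pvCountB sids aging_summary "HEALTHY"),
       ("TRANSFER", t + pvCountB sids aging_summary "TRANSFER"),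
       ("RR_TT", r + pvCountB sids aging_summary "RR_TT"),
       ("VERY_DANGER", v + pvCountB sids aging_summary "VERY_DANGER")] := by
  induction sids generalizing h t r v with
  | nil => simp [pvCountB]
  | cons sid rest ih =>
    simp only [List.foldl_cons]
    have hbody :
        pvStepA aging_summary
          (PySem.Dict.mk [("HEALTHY", h), ("TRANSFER", t), ("RR_TT", r), ("VERY_DANGER", v)]) sid =
        PySem.Dict.mk
          [("HEALTHY", h + pvCountB [sid] aging_summary "HEALTHY"),
           ("TRANSFER", t + pvCountB [sid] aging_summary "TRANSFER"),
           ("RR_TT", r + pvCountB [sid] aging_summary "RR_TT"),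
           ("VERY_DANGER", v + pvCountB [sid] aging_summary "VERY_DANGER")] := by
      unfold pvStepA
      cases hget : (PySem.Dict.mk aging_summary).get? sid with
      | none => simp [pvCountB, hget]
      | some aging =>
        by_cases hnil : aging = []
        · simp [pvCountB, hget, hnil]
        · dsimp only
          rw [if_neg hnil]
          by_cases h1 : 0 < (PySem.Dict.mk aging).getD "HEALTHY" 0 <;>
          by_cases h2 : 0 < (PySem.Dict.mk aging).getD "TRANSFER" 0 <;>
          by_cases h3 : 0 < (PySem.Dict.mk aging).getD "RR_TT" 0 <;>
          by_cases h4 : 0 < (PySem.Dict.mk aging).getD "VERY_DANGER" 0 <;>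
          simp only [gt_iff_lt, h1, h2, h3, h4, if_true, if_false,
            pvMod_HEALTHY, pvMod_TRANSFER, pvMod_RR_TT, pvMod_VERY_DANGER] <;>
          simp [pvCountB, hget, hnil, h1, h2, h3, h4]
    rw [hbody, ih]
    have hc : ∀ s, pvCountB (sid :: rest) aging_summary s =
        pvCountB [sid] aging_summary s + pvCountB rest aging_summary s := by
      intro s; simp [pvCountB]
    simp only [hc]
    simp only [PySem.Dict.mk.injEq, List.cons.injEq, Prod.mk.injEq, and_true, true_and]
    omega

-- ===== VERDICT (by name: the statement is the Claim_ definition above) =====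
theorem compute_status_counts_py_spec : Claim_equal_compute_status_counts_py := by
  intro store_ids aging_summary _
  unfold Spec_compute_status_counts_py compute_status_counts_py compute_status_counts_py_alt
  rw [pv_loop_inv]
  simp
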